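-- pv_equiv track=rewrite | github.com/johnwshc/flaskAI | analz/ai/utils/medium_utils.py | compute_chunks
-- ===== SOURCE A (Python) =====
-- def compute_chunks(sentences, chunk_size=700 ):
--     wl = lambda x: len(x.split(' '))
--     sensums = []
--     chunks = []
--     for s in sentences:
--         nw = wl(s)
--         sensums.append((nw,s))
--
--         chunk_sum = sum([x[0] for x in sensums])
--         if chunk_sum >= chunk_size:
--             ctxt = [' '.join(s[1]) for s in sensums]
--
--             chunks.append(ctxt)
--             sensums.clear()
--
--     return chunks
-- ===== SOURCE B (Python) =====
-- def compute_chunks(sentences, chunk_size=700):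
--     # staged: precompute word counts and space-joined texts, then cut with an
--     # index-based scan that keeps a running total instead of re-summing
--     counts = [len(s.split(' ')) for s in sentences]
--     joined = [' '.join(s) for s in sentences]
--     chunks = []
--     i, n = 0, len(sentences)
--     while i < n:
--         total = counts[i]
--         j = i + 1
--         while j < n and total < chunk_size:
--             total += counts[j]
--             j += 1
--         if total < chunk_size:
--             break
--         chunks.append(joined[i:j])
--         i = j
--     return chunks
-- ===== Notes on version B (the rewrite author's own statement) =====
-- stated objective: faster
-- what changed: B precomputes word counts and joined texts in two passes, then cuts chunk boundaries with an index scan keeping a running total, instead of A's per-sentence re-summation of the whole pending list and per-flush join pass.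
import Mathlib
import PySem

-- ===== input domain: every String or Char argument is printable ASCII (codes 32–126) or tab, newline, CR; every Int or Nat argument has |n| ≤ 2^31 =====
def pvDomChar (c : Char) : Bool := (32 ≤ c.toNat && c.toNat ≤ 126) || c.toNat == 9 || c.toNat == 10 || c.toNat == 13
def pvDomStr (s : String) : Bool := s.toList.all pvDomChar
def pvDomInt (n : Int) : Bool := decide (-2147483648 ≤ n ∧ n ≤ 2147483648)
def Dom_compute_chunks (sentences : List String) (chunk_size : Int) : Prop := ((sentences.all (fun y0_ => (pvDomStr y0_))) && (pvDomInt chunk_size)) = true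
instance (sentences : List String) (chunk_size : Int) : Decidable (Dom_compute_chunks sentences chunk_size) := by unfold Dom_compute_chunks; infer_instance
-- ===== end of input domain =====

-- B precomputes word counts and joined texts once, then cuts chunk boundaries with an
-- index scan keeping a running total, instead of A's per-sentence re-summation of the
-- pending list (and per-flush join pass): asymptotically faster, same return value.

-- ===== PORT A =====
-- wl = lambda x: len(x.split(' '))
def pvA_wl (x : String) : Int := ((PySem.Chars.splitOn x.toList [' ']).length : Int)

-- ctxt entry: ' '.join(s[1])  (joins the CHARACTERS of the sentence with spaces)
def pvA_join (s : String) : String := PySem.Str.join " " (s.toList.map (fun c => String.ofList [c]))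

def compute_chunks (sentences : List String) (chunk_size : Int) : List (List String) :=
  (sentences.foldl
    (fun (st : List (Int × String) × List (List String)) s =>
      let sensums := st.1 ++ [(pvA_wl s, s)]
      let chunk_sum := (sensums.map (fun x => x.1)).sum
      if chunk_sum ≥ chunk_size then
        let ctxt := sensums.map (fun p => pvA_join p.2)
        ([], st.2 ++ [ctxt])
      else
        (sensums, st.2))
    ([], [])).2

-- ===== PORT B =====
def pvB_wl (x : String) : Int := ((PySem.Chars.splitOn x.toList [' ']).length : Int)

def pvB_join (s : String) : String := PySem.Str.join " " (s.toList.map (fun c => String.ofList [c]))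

-- inner while loop: extend the current chunk while total < chunk_size;
-- returns (texts taken, remaining items, final total)
def pvB_take (k : Int) (total : Int) : List (Int × String) → List String × List (Int × String) × Int
  | [] => ([], [], total)
  | (c, s) :: rest =>
    if total < k then
      let r := pvB_take k (total + c) rest
      (s :: r.1, r.2.1, r.2.2)
    else
      ([], (c, s) :: rest, total)

theorem pvB_take_len (k total : Int) (l : List (Int × String)) :
    (pvB_take k total l).2.1.length ≤ l.length := by
  induction l generalizing total with
  | nil => simp [pvB_take]
  | cons p rest ih =>
    simp only [pvB_take]
    split
    · exact Nat.le_succ_of_le (ih _)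
    · exact Nat.le_refl _

-- outer while loop: take one chunk starting at the current position, keep it only
-- if the running total reached chunk_size, otherwise stop (remainder dropped)
def pvB_chunks (k : Int) : List (Int × String) → List (List String)
  | [] => []
  | (c, s) :: rest =>
    let r := pvB_take k c rest
    if r.2.2 ≥ k then (s :: r.1) :: pvB_chunks k r.2.1 else []
termination_by l => l.length
decreasing_by exact Nat.lt_succ_of_le (pvB_take_len k c rest)

def compute_chunks_alt (sentences : List String) (chunk_size : Int) : List (List String) :=
  pvB_chunks chunk_size (sentences.map (fun s => (pvB_wl s, pvB_join s)))

-- ===== PRECONDITION & SPEC =====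
def Spec_compute_chunks (sentences : List String) (chunk_size : Int) (out : List (List String)) : Prop := out = compute_chunks_alt sentences chunk_size
instance (sentences : List String) (chunk_size : Int) (out : List (List String)) : Decidable (Spec_compute_chunks sentences chunk_size out) := by unfold Spec_compute_chunks; infer_instance

-- ===== CLAIM (what is proved, stated in full; the proofs are below) =====
def Claim_equal_compute_chunks : Prop := ∀ (sentences : List String) (chunk_size : Int), Dom_compute_chunks sentences chunk_size → Spec_compute_chunks sentences chunk_size (compute_chunks sentences chunk_size)

-- ===== LEMMAS AND PROOFS =====

-- proof-side middle man: processes the remaining items exactly as A's loop does,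
-- carrying the current chunk texts and their running word-count total
def pvG (k : Int) (cur : List String) (t : Int) : List (Int × String) → List (List String)
  | [] => []
  | (c, s) :: rest =>
    if t + c ≥ k then (cur ++ [s]) :: pvB_chunks k rest
    else pvG k (cur ++ [s]) (t + c) rest

-- pvG mid-state (with total still below k) is what pvB_take computes
theorem pvG_take (k : Int) (l : List (Int × String)) :
    ∀ cur t, t < k →
    pvG k cur t l =
      (let r := pvB_take k t l
       if r.2.2 ≥ k then (cur ++ r.1) :: pvB_chunks k r.2.1 else []) := by
  induction l with
  | nil => intro cur t ht; simp [pvG, pvB_take, not_le.mpr ht]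
  | cons p rest ih =>
    intro cur t ht
    obtain ⟨c, s⟩ := p
    simp only [pvG, pvB_take, if_pos ht]
    by_cases h : t + c ≥ k
    · rw [if_pos h]
      cases rest with
      | nil => simp [pvB_take, if_pos h, pvB_chunks]
      | cons q r2 =>
        obtain ⟨c2, s2⟩ := q
        simp [pvB_take, not_lt.mpr h, if_pos h]
    · rw [if_neg h]
      have := ih (cur ++ [s]) (t + c) (lt_of_not_ge h)
      simpa [List.append_assoc] using this

-- starting pvG with an empty pending chunk is exactly pvB_chunks
theorem pvG_nil (k : Int) (l : List (Int × String)) :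
    pvG k [] 0 l = pvB_chunks k l := by
  cases l with
  | nil => simp [pvG, pvB_chunks]
  | cons p rest =>
    obtain ⟨c, s⟩ := p
    simp only [pvG, pvB_chunks, zero_add, List.nil_append]
    by_cases h : c ≥ k
    · rw [if_pos h]
      cases rest with
      | nil => simp [pvB_take, if_pos h, pvB_chunks]
      | cons q r2 => simp [pvB_take, not_lt.mpr h, if_pos h]
    · rw [if_neg h, pvG_take k rest [s] c (lt_of_not_ge h)]
      simp

-- A's fold, from an arbitrary pending state, equals pvG on the mapped remainder
theorem pvA_eq_G (l : List String) (k : Int) :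
    ∀ (sensums : List (Int × String)) (chunks : List (List String)),
    (∀ p ∈ sensums, p.1 = pvA_wl p.2) →
    (l.foldl
      (fun (st : List (Int × String) × List (List String)) s =>
        let sensums := st.1 ++ [(pvA_wl s, s)]
        let chunk_sum := (sensums.map (fun x => x.1)).sum
        if chunk_sum ≥ k then
          let ctxt := sensums.map (fun p => pvA_join p.2)
          ([], st.2 ++ [ctxt])
        else
          (sensums, st.2))
      (sensums, chunks)).2
    = chunks ++ pvG k (sensums.map (fun p => pvA_join p.2))
        ((sensums.map (fun x => x.1)).sum)
        (l.map (fun s => (pvA_wl s, pvA_join s))) := by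
  induction l with
  | nil => intro sensums chunks _; simp [pvG]
  | cons s t ih =>
    intro sensums chunks hws
    simp only [List.foldl_cons, List.map_cons, pvG]
    by_cases h : (sensums.map (fun x => x.1)).sum + pvA_wl s ≥ k
    · rw [if_pos (by simpa using h), if_pos h]
      rw [ih [] (chunks ++ [(sensums ++ [(pvA_wl s, s)]).map (fun p => pvA_join p.2)]) (by simp)]
      simp [pvG_nil, List.append_assoc]
    · rw [if_neg (by simpa using h), if_neg h]
      rw [ih (sensums ++ [(pvA_wl s, s)]) chunks
        (by intro p hp; rcases List.mem_append.mp hp with h1 | h1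
            · exact hws p h1
            · simp at h1; subst h1; rfl)]
      simp

-- ===== VERDICT (by name: the statement is the Claim_ definition above) =====
theorem compute_chunks_spec : Claim_equal_compute_chunks := by
  intro sentences chunk_size _
  unfold Spec_compute_chunks compute_chunks compute_chunks_alt
  rw [pvA_eq_G sentences chunk_size [] [] (by simp)]
  simpa using pvG_nil chunk_size (sentences.map (fun s => (pvA_wl s, pvA_join s)))
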